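-- pv_equiv track=rewrite | github.com/Sidh-Sharma/NeuralNetwork-PDEs | fokker_planck/model.py | generate_basis
-- ===== SOURCE A (Python) =====
-- def generate_basis(max_degree: int):
--     basis_indices = []
--     for total in range(max_degree + 1):
--         for n in range(total + 1):
--             for m in range(total + 1 - n):
--                 k = total - n - m
--                 basis_indices.append((n, m, k))
--     return basis_indices
-- ===== SOURCE B (Python) =====
-- def generate_basis(max_degree: int):
--     rng = range(max_degree + 1)
--     triples = [(n, m, k) for n in rng for m in rng for k in rng
--                if n + m + k <= max_degree]
--     return sorted(triples, key=lambda t: t[0] + t[1] + t[2])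
-- ===== Notes on version B (the rewrite author's own statement) =====
-- stated objective: alternative
-- what changed: B collects the cube [0..d]^3 filtered by n+m+k <= d in plain lexicographic order and then stably sorts by total degree, instead of A's direct ordered enumeration by total with k computed as a remainder.
import Mathlib
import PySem

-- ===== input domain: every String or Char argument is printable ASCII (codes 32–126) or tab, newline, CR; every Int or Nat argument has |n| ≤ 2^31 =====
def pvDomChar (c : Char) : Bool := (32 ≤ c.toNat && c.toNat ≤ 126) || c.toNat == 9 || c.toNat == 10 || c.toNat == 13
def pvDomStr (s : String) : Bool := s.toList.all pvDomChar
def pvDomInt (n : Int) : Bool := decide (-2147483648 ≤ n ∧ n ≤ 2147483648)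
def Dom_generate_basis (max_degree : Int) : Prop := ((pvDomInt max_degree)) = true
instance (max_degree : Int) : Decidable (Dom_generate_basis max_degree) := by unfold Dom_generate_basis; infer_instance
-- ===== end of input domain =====

-- B collects the cube [0..d]^3 filtered by n+m+k <= d and stably sorts it by total degree,
-- instead of A's direct ordered enumeration by total degree (objective: alternative decomposition).


-- ===== PORT A =====
def generate_basis (max_degree : Int) : List (Int × Int × Int) :=
  (PySem.List.pyRange 0 (max_degree + 1) 1).foldl (fun acc total =>
    (PySem.List.pyRange 0 (total + 1) 1).foldl (fun acc n =>
      (PySem.List.pyRange 0 (total + 1 - n) 1).foldl (fun acc m =>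
        acc ++ [(n, m, total - n - m)]) acc) acc) []

-- ===== PORT B =====
def generate_basis_alt (max_degree : Int) : List (Int × Int × Int) :=
  let rng := PySem.List.pyRange 0 (max_degree + 1) 1
  let triples := rng.flatMap (fun n => rng.flatMap (fun m =>
    (rng.filter (fun k => decide (n + m + k ≤ max_degree))).map (fun k => (n, m, k))))
  PySem.List.sorted triples (fun t => t.1 + t.2.1 + t.2.2) false

-- ===== PRECONDITION & SPEC =====
def Spec_generate_basis (max_degree : Int) (out : List (Int × Int × Int)) : Prop := out = generate_basis_alt max_degree
instance (max_degree : Int) (out : List (Int × Int × Int)) : Decidable (Spec_generate_basis max_degree out) := by unfold Spec_generate_basis; infer_instance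

-- ===== CLAIM (what is proved, stated in full; the proofs are below) =====
def Claim_equal_generate_basis : Prop := ∀ (max_degree : Int), Dom_generate_basis max_degree → Spec_generate_basis max_degree (generate_basis max_degree)

-- ===== LEMMAS AND PROOFS =====

theorem pv_insertBy_all_before {α : Type} (bf : α → α → Bool) (x : α) (l : List α)
    (h : ∀ y ∈ l, bf x y = true) : PySem.List.insertBy bf x l = x :: l := by
  cases l with
  | nil => simp [PySem.List.insertBy]
  | cons y ys => simp [PySem.List.insertBy, h y (by simp)]

theorem pv_insertBy_append {α : Type} (bf : α → α → Bool) (x : α) (l rest : List α)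
    (h : ∀ y ∈ l, bf x y = false) :
    PySem.List.insertBy bf x (l ++ rest) = l ++ PySem.List.insertBy bf x rest := by
  induction l with
  | nil => simp
  | cons y ys ih =>
      simp only [List.cons_append, PySem.List.insertBy, h y (by simp)]
      simp [ih (fun z hz => h z (by simp [hz]))]

theorem pv_insertBy_buckets {α : Type} (key : α → Int) (x : α) (vs : List Int)
    (B : Int → List α) (hvs : vs.Pairwise (· < ·)) (hx : key x ∈ vs)
    (hB : ∀ v ∈ vs, ∀ y ∈ B v, key y = v) :
    PySem.List.insertBy (fun a b => decide (key a < key b)) x (vs.flatMap B)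
      = vs.flatMap (fun v => B v ++ if v = key x then [x] else []) := by
  induction vs with
  | nil => simp at hx
  | cons v vs' ih =>
      have hpw := (List.pairwise_cons.mp hvs).1
      have hvs' := (List.pairwise_cons.mp hvs).2
      by_cases hv : v = key x
      · subst hv
        have hrest : ∀ y ∈ vs'.flatMap B, (fun a b => decide (key a < key b)) x y = true := by
          intro y hy
          rcases List.mem_flatMap.mp hy with ⟨w, hw, hyw⟩
          have := hB w (by simp [hw]) y hyw
          have := hpw w hw
          simp only [decide_eq_true_eq]; omega
        have hl : ∀ y ∈ B (key x), (fun a b => decide (key a < key b)) x y = false := by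
          intro y hy
          have := hB (key x) (by simp) y hy
          simp only [decide_eq_false_iff_not]; omega
        rw [List.flatMap_cons, pv_insertBy_append _ _ _ _ hl,
            pv_insertBy_all_before _ _ _ hrest]
        have : ∀ w ∈ vs', (B w ++ if w = key x then [x] else []) = B w := by
          intro w hw
          have := hpw w hw
          have : w ≠ key x := by omega
          simp [this]
        simp only [List.flatMap_cons]
        rw [List.flatMap_congr this]
        simp
      · have hx' : key x ∈ vs' := by
          rcases List.mem_cons.mp hx with h | h
          · exact absurd h.symm hv
          · exact h
        have hvlt : v < key x := hpw _ hx'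
        have hl : ∀ y ∈ B v, (fun a b => decide (key a < key b)) x y = false := by
          intro y hy
          have := hB v (by simp) y hy
          simp only [decide_eq_false_iff_not]; omega
        rw [List.flatMap_cons, pv_insertBy_append _ _ _ _ hl,
            ih hvs' hx' (fun w hw => hB w (by simp [hw]))]
        have : v ≠ key x := by omega
        simp [List.flatMap_cons, this]

theorem pv_sorted_buckets {α : Type} (key : α → Int) (xs : List α) (vs : List Int)
    (hvs : vs.Pairwise (· < ·)) (hall : ∀ x ∈ xs, key x ∈ vs) :
    PySem.List.sorted xs key false = vs.flatMap (fun v => xs.filter (fun y => decide (key y = v))) := by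
  rw [PySem.List.sorted_eq_foldl_insertBy]
  induction xs using List.reverseRecOn with
  | nil => simp
  | append_singleton xs x ih =>
      rw [List.foldl_append, List.foldl_cons, List.foldl_nil,
          ih (fun z hz => hall z (by simp [hz])),
          pv_insertBy_buckets key x vs _ hvs (hall x (by simp))
            (by intro v hv y hy
                have := List.of_mem_filter hy
                simpa using this)]
      apply List.flatMap_congr
      intro v hv
      rw [List.filter_append]
      congr 1
      by_cases h : v = key x
      · simp [h]
      · simp [h, Ne.symm h]

theorem pv_filter_eq_singleton (l : List Int) (c : Int) (h : l.Nodup) :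
    l.filter (fun x => decide (x = c)) = if c ∈ l then [c] else [] := by
  induction l with
  | nil => simp
  | cons y ys ih =>
      rcases List.nodup_cons.mp h with ⟨hy, hys⟩
      by_cases hc : y = c
      · subst hc
        simp only [List.filter_cons, decide_eq_true_eq]
        rw [List.filter_eq_nil_iff.mpr (by intro a ha; simp; intro hac; exact hy (hac ▸ ha))]
        simp
      · simp only [List.filter_cons]
        rw [ih hys]
        simp only [hc, decide_false, List.mem_cons]
        by_cases hm : c ∈ ys <;> simp [hm] <;> exact fun h => hc h.symm

theorem pv_flatMap_singleton {α β : Type} (l : List α) (g : α → β) :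
    l.flatMap (fun x => [g x]) = l.map g := by
  induction l with
  | nil => rfl
  | cons y ys ih => simp [ih]

theorem pv_A_flatMap (d : Int) :
    generate_basis d = (PySem.List.pyRange 0 (d + 1) 1).flatMap (fun t =>
      (PySem.List.pyRange 0 (t + 1) 1).flatMap (fun n =>
        (PySem.List.pyRange 0 (t + 1 - n) 1).map (fun m => (n, m, t - n - m)))) := by
  unfold generate_basis
  simp only [PySem.List.foldl_append_singleton_eq_map, PySem.List.foldl_append_eq_flatMap]
  simp

theorem pv_bucket_eq_block (d t : Int) (ht0 : 0 ≤ t) (htd : t < d + 1) :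
    ((PySem.List.pyRange 0 (d + 1) 1).flatMap (fun n => (PySem.List.pyRange 0 (d + 1) 1).flatMap (fun m =>
      ((PySem.List.pyRange 0 (d + 1) 1).filter (fun k => decide (n + m + k ≤ d))).map (fun k => (n, m, k))))).filter
        (fun y => decide (y.1 + y.2.1 + y.2.2 = t))
      = (PySem.List.pyRange 0 (t + 1) 1).flatMap (fun n =>
          (PySem.List.pyRange 0 (t + 1 - n) 1).map (fun m => (n, m, t - n - m))) := by
  rw [List.filter_flatMap]
  have step1 : ∀ n ∈ PySem.List.pyRange 0 (d + 1) 1,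
      ((PySem.List.pyRange 0 (d + 1) 1).flatMap (fun m =>
        ((PySem.List.pyRange 0 (d + 1) 1).filter (fun k => decide (n + m + k ≤ d))).map (fun k => (n, m, k)))).filter
          (fun y => decide (y.1 + y.2.1 + y.2.2 = t))
      = (PySem.List.pyRange 0 (d + 1) 1).flatMap (fun m =>
          if 0 ≤ t - n - m ∧ t - n - m < d + 1 then [(n, m, t - n - m)] else []) := by
    intro n hn
    rw [List.filter_flatMap]
    apply List.flatMap_congr
    intro m hm
    rw [List.filter_map, List.filter_filter]
    have : ∀ k ∈ PySem.List.pyRange 0 (d + 1) 1,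
        (((fun y => decide ((y : Int × Int × Int).1 + y.2.1 + y.2.2 = t)) ∘ (fun k => (n, m, k))) k
          && decide (n + m + k ≤ d)) = decide (k = t - n - m) := by
      intro k hk
      simp only [Function.comp]
      by_cases h : k = t - n - m
      · subst h
        have h1 : n + m + (t - n - m) = t := by ring
        have h2 : n + m + (t - n - m) ≤ d := by omega
        simp [h1]
        omega
      · have h1 : ¬ (n + m + k = t) := by omega
        simp [h, h1]
    rw [List.filter_congr this, pv_filter_eq_singleton _ _ (PySem.List.nodup_pyRange_one _ _)]
    have hiff : (t - n - m ∈ PySem.List.pyRange 0 (d + 1) 1) ↔ (0 ≤ t - n - m ∧ t - n - m < d + 1) :=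
      PySem.List.mem_pyRange_one
    by_cases h : 0 ≤ t - n - m ∧ t - n - m < d + 1
    · rw [if_pos (hiff.mpr h), if_pos h]; rfl
    · rw [if_neg (fun hc => h (hiff.mp hc)), if_neg h]; rfl
  rw [List.flatMap_congr step1]
  have splitOuter : ∀ (g : Int → List (Int × Int × Int)),
      (PySem.List.pyRange 0 (d + 1) 1).flatMap g
        = (PySem.List.pyRange 0 (t + 1) 1).flatMap g ++ (PySem.List.pyRange (t + 1) (d + 1) 1).flatMap g := by
    intro g
    rw [PySem.List.pyRange_one_append 0 (t + 1) (d + 1) (by omega) (by omega), List.flatMap_append]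
  rw [splitOuter (fun n => (PySem.List.pyRange 0 (d + 1) 1).flatMap (fun m =>
      if 0 ≤ t - n - m ∧ t - n - m < d + 1 then [(n, m, t - n - m)] else []))]
  have outer2 : (PySem.List.pyRange (t + 1) (d + 1) 1).flatMap (fun n =>
      (PySem.List.pyRange 0 (d + 1) 1).flatMap (fun m =>
        if 0 ≤ t - n - m ∧ t - n - m < d + 1 then [(n, m, t - n - m)] else [])) = [] := by
    apply List.flatMap_eq_nil_iff.mpr
    intro n hn
    apply List.flatMap_eq_nil_iff.mpr
    intro m hm
    have hn' := PySem.List.mem_pyRange_one.mp hn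
    have hm' := PySem.List.mem_pyRange_one.mp hm
    rw [if_neg (by omega)]
  rw [outer2, List.append_nil]
  apply List.flatMap_congr
  intro n hn
  have hn' := PySem.List.mem_pyRange_one.mp hn
  rw [PySem.List.pyRange_one_append 0 (t + 1 - n) (d + 1) (by omega) (by omega), List.flatMap_append]
  have inner2 : (PySem.List.pyRange (t + 1 - n) (d + 1) 1).flatMap (fun m =>
      if 0 ≤ t - n - m ∧ t - n - m < d + 1 then [(n, m, t - n - m)] else []) = [] := by
    apply List.flatMap_eq_nil_iff.mpr
    intro m hm
    have hm' := PySem.List.mem_pyRange_one.mp hm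
    rw [if_neg (by omega)]
  rw [inner2, List.append_nil]
  have : ∀ m ∈ PySem.List.pyRange 0 (t + 1 - n) 1,
      (if 0 ≤ t - n - m ∧ t - n - m < d + 1 then [(n, m, t - n - m)] else []) = [(n, m, t - n - m)] := by
    intro m hm
    have hm' := PySem.List.mem_pyRange_one.mp hm
    rw [if_pos (by omega)]
  rw [List.flatMap_congr this]
  exact pv_flatMap_singleton _ _

-- ===== VERDICT (by name: the statement is the Claim_ definition above) =====
theorem generate_basis_spec : Claim_equal_generate_basis := by
  intro d _
  show generate_basis d = PySem.List.sorted _ _ false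
  show generate_basis d = PySem.List.sorted _ _ false
  rw [pv_A_flatMap]
  have hall : ∀ x ∈ (PySem.List.pyRange 0 (d + 1) 1).flatMap (fun n => (PySem.List.pyRange 0 (d + 1) 1).flatMap (fun m =>
      ((PySem.List.pyRange 0 (d + 1) 1).filter (fun k => decide (n + m + k ≤ d))).map (fun k => (n, m, k)))),
      (x : Int × Int × Int).1 + x.2.1 + x.2.2 ∈ PySem.List.pyRange 0 (d + 1) 1 := by
    intro x hx
    rcases List.mem_flatMap.mp hx with ⟨n, hn, hx⟩
    rcases List.mem_flatMap.mp hx with ⟨m, hm, hx⟩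
    rcases List.mem_map.mp hx with ⟨k, hk, rfl⟩
    have hkf := List.of_mem_filter hk
    have hk' := PySem.List.mem_pyRange_one.mp (List.mem_of_mem_filter hk)
    have hn' := PySem.List.mem_pyRange_one.mp hn
    have hm' := PySem.List.mem_pyRange_one.mp hm
    simp only [decide_eq_true_eq] at hkf
    dsimp only
    exact PySem.List.mem_pyRange_one.mpr (by constructor <;> omega)
  rw [pv_sorted_buckets (fun t : Int × Int × Int => t.1 + t.2.1 + t.2.2) _ (PySem.List.pyRange 0 (d + 1) 1)
      (PySem.List.pairwise_lt_pyRange_one _ _) hall]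
  symm
  apply List.flatMap_congr
  intro t ht
  have ht' := PySem.List.mem_pyRange_one.mp ht
  exact pv_bucket_eq_block d t ht'.1 ht'.2
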